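-- pv_equiv track=rewrite | github.com/kshannoninnes/hyprfire | src/hyprfire/hyprfire_app/old_scripts/PcapToN2DConverter.py | FlagProc
-- ===== SOURCE A (Python) =====
-- def FlagProc(stringz):
--     SYN = 0
--     ACK = 0
--     FIN = 0
--     RST = 0
--     PSH = 0
--     URG = 0
--     for letter in stringz:
--         if letter == 'S': SYN = 1
--         if letter == 'A': ACK = 1
--         if letter == 'F': FIN = 1
--         if letter == 'R': RST = 1
--         if letter == 'P': PSH = 1
--         if letter == 'U': URG = 1
--         if letter == '.': ACK = 1
--     lerps = str(SYN) + ',' + str(ACK) + ',' + str(FIN) + ',' + str(RST) + ',' + str(PSH) + ',' + str(URG) + ',0'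
--     return lerps
-- ===== SOURCE B (Python) =====
-- def FlagProc(stringz):
--     SYN = 1 if 'S' in stringz else 0
--     ACK = 1 if ('A' in stringz or '.' in stringz) else 0
--     FIN = 1 if 'F' in stringz else 0
--     RST = 1 if 'R' in stringz else 0
--     PSH = 1 if 'P' in stringz else 0
--     URG = 1 if 'U' in stringz else 0
--     return ','.join(str(f) for f in (SYN, ACK, FIN, RST, PSH, URG)) + ',0'
-- ===== Notes on version B (the rewrite author's own statement) =====
-- stated objective: idiomatic
-- what changed: Replaces the single character loop with stateful flag variables by six independent substring membership tests and a join of the flag values.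
import Mathlib
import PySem

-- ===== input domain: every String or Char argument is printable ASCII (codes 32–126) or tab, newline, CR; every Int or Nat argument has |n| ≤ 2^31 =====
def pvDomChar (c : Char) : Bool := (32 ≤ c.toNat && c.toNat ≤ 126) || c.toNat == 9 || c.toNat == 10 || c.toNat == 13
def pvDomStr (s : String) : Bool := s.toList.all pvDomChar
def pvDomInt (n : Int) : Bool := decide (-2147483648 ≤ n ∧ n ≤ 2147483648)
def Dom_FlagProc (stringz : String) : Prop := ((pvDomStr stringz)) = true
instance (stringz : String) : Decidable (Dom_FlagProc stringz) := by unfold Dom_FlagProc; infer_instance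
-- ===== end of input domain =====

-- B replaces A's single accumulation loop by six independent membership tests plus a join (idiomatic decomposition, same cost).

-- ===== PORT A =====
-- state = (SYN, ACK, FIN, RST, PSH, URG); each 'if letter == …' in A's loop body, in order
def flagStepA (st : Int × Int × Int × Int × Int × Int) (c : Char) : Int × Int × Int × Int × Int × Int :=
  let syn := if c = 'S' then 1 else st.1
  let ack := if c = 'A' then 1 else st.2.1
  let fin := if c = 'F' then 1 else st.2.2.1
  let rst := if c = 'R' then 1 else st.2.2.2.1
  let psh := if c = 'P' then 1 else st.2.2.2.2.1
  let urg := if c = 'U' then 1 else st.2.2.2.2.2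
  let ack := if c = '.' then 1 else ack
  (syn, ack, fin, rst, psh, urg)

def FlagProc (stringz : String) : String :=
  let st := stringz.toList.foldl flagStepA (0, 0, 0, 0, 0, 0)
  PySem.Int.toStr st.1 ++ "," ++ PySem.Int.toStr st.2.1 ++ "," ++ PySem.Int.toStr st.2.2.1 ++ ","
    ++ PySem.Int.toStr st.2.2.2.1 ++ "," ++ PySem.Int.toStr st.2.2.2.2.1 ++ ","
    ++ PySem.Int.toStr st.2.2.2.2.2 ++ ",0"

-- ===== PORT B =====
def FlagProc_alt (stringz : String) : String :=
  let l := stringz.toList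
  let syn : Int := if l.contains 'S' then 1 else 0
  let ack : Int := if l.contains 'A' || l.contains '.' then 1 else 0
  let fin : Int := if l.contains 'F' then 1 else 0
  let rst : Int := if l.contains 'R' then 1 else 0
  let psh : Int := if l.contains 'P' then 1 else 0
  let urg : Int := if l.contains 'U' then 1 else 0
  PySem.Str.join "," ([syn, ack, fin, rst, psh, urg].map PySem.Int.toStr) ++ ",0"

-- ===== PRECONDITION & SPEC =====
def Spec_FlagProc (stringz : String) (out : String) : Prop := out = FlagProc_alt stringz
instance (stringz : String) (out : String) : Decidable (Spec_FlagProc stringz out) := by unfold Spec_FlagProc; infer_instance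

-- ===== CLAIM (what is proved, stated in full; the proofs are below) =====
def Claim_equal_FlagProc : Prop := ∀ (stringz : String), Dom_FlagProc stringz → Spec_FlagProc stringz (FlagProc stringz)

-- ===== LEMMAS AND PROOFS =====
theorem foldl_flagStepA (l : List Char) (st : Int × Int × Int × Int × Int × Int) :
    l.foldl flagStepA st =
      (if l.contains 'S' then 1 else st.1,
       if l.contains 'A' || l.contains '.' then 1 else st.2.1,
       if l.contains 'F' then 1 else st.2.2.1,
       if l.contains 'R' then 1 else st.2.2.2.1,
       if l.contains 'P' then 1 else st.2.2.2.2.1,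
       if l.contains 'U' then 1 else st.2.2.2.2.2) := by
  induction l generalizing st with
  | nil => simp
  | cons c t ih =>
    simp only [List.foldl_cons, ih, List.contains_cons]
    obtain ⟨a, b, d, e, f, g⟩ := st
    simp only [flagStepA, Prod.mk.injEq]
    refine ⟨?_, ?_, ?_, ?_, ?_, ?_⟩ <;> split_ifs <;> simp_all <;> simp_all [eq_comm]

theorem join_six (a b c d e f : String) :
    PySem.Str.join "," ([a, b, c, d, e, f]) = a ++ "," ++ b ++ "," ++ c ++ "," ++ d ++ "," ++ e ++ "," ++ f := by
  simp [PySem.Str.join, PySem.Chars.join, String.ext_iff, List.intercalate, List.intersperse]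

-- ===== VERDICT (by name: the statement is the Claim_ definition above) =====
theorem FlagProc_spec : Claim_equal_FlagProc := by
  intro s _
  show FlagProc s = FlagProc_alt s
  simp only [FlagProc, FlagProc_alt, foldl_flagStepA, List.map]
  rw [join_six]
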